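-- pv_equiv track=rewrite | github.com/akent4000/Universal-Gate-Compiler | nand_optimizer/exact_synthesis.py | evaluate_template
-- ===== SOURCE A (Python) =====
-- from typing import Dict, List, Optional, Tuple
--
-- Template = Tuple[int, List[Tuple[int, int]]]
--
-- def _input_tt(i: int, n_inputs: int) -> int:
--     V  = 1 << n_inputs
--     tt = 0
--     for m in range(V):
--         if (m >> i) & 1:
--             tt |= (1 << m)
--     return tt
--
-- def evaluate_template(
--     template:  Template,
--     n_inputs:  int,
-- ) -> int:
--     """Evaluate a ``(out_lit, ops)`` template and return its truth table."""
--     out_lit, ops = template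
--     V    = 1 << n_inputs
--     mask = (1 << V) - 1
--
--     tt_of: Dict[int, int] = {0: 0, 1: mask}
--     for i in range(n_inputs):
--         t = _input_tt(i, n_inputs)
--         tt_of[2 + 2 * i] = t
--         tt_of[3 + 2 * i] = (~t) & mask
--
--     op_base = 2 + 2 * n_inputs
--     for j, (a, b) in enumerate(ops):
--         v = tt_of[a] & tt_of[b]
--         tt_of[op_base + 2 * j]     = v & mask
--         tt_of[op_base + 2 * j + 1] = (~v) & mask
--
--     return tt_of[out_lit]
-- ===== SOURCE B (Python) =====
-- def evaluate_template(template, n_inputs):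
--     """Per-minterm simulator: evaluate the template on each input assignment
--     with scalar 0/1 values instead of bit-parallel big-integer truth tables."""
--     out_lit, ops = template
--     tt = 0
--     for m in range(1 << n_inputs):
--         val = [0, 1]
--         for i in range(n_inputs):
--             bit = (m >> i) & 1
--             val.append(bit)
--             val.append(1 - bit)
--         for a, b in ops:
--             v = val[a] & val[b]
--             val.append(v)
--             val.append(1 - v)
--         if val[out_lit]:
--             tt |= 1 << m
--     return tt
-- ===== Notes on version B (the rewrite author's own statement) =====
-- stated objective: alternative
-- what changed: A evaluates the template in one pass over ops using bit-parallel big-integer truth tables (a dict of 2^n-bit ints); B instead loops over every minterm m and simulates the ops with scalar 0/1 values in a flat list, setting bit m of the result when the output literal is 1.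
import Mathlib
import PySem

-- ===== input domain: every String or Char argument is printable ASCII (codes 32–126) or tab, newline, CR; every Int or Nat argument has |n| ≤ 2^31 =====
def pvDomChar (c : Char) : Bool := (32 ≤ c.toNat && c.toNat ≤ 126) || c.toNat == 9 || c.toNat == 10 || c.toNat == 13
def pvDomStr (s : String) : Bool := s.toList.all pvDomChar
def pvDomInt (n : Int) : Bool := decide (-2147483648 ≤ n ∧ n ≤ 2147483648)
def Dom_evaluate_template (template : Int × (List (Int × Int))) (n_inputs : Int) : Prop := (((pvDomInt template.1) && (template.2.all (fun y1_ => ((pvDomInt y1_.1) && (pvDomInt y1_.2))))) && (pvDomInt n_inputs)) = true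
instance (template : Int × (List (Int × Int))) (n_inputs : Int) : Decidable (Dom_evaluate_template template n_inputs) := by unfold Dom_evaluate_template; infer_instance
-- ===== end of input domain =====

-- B replaces A's single bit-parallel pass over big-integer truth tables by a nested
-- per-minterm scalar simulation (objective: alternative, same asymptotic cost).

-- ===== PORT A =====
-- helper _input_tt (i is the Nat loop index of `for i in range(n_inputs)`)
def pvInputTT (i : Nat) (n_inputs : Int) : Int :=
  (List.range (1 <<< n_inputs.toNat)).foldl
    (fun tt m => if (m >>> i) &&& 1 == 1 then Int.lor tt ((1 : Int) <<< m) else tt) 0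

def evaluate_template (template : Int × (List (Int × Int))) (n_inputs : Int) : Int :=
  let out_lit := template.1
  let ops := template.2
  let V : Nat := 1 <<< n_inputs.toNat
  let mask : Int := ((1 : Int) <<< V) - 1
  let d0 : PySem.Dict Int Int := (PySem.Dict.empty.insert 0 0).insert 1 mask
  let d1 := (List.range n_inputs.toNat).foldl
    (fun d i =>
      let t := pvInputTT i n_inputs
      (d.insert (2 + 2 * (i : Int)) t).insert (3 + 2 * (i : Int)) (Int.land (~~~t) mask)) d0
  let op_base : Int := 2 + 2 * n_inputs
  let d2 := (PySem.List.enumerate ops).foldl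
    (fun d p =>
      let v := Int.land ((d.get? p.2.1).getD 0) ((d.get? p.2.2).getD 0)
      (d.insert (op_base + 2 * p.1) (Int.land v mask)).insert (op_base + 2 * p.1 + 1) (Int.land (~~~v) mask)) d1
  (d2.get? out_lit).getD 0

-- ===== PORT B =====
def evaluate_template_alt (template : Int × (List (Int × Int))) (n_inputs : Int) : Int :=
  let out_lit := template.1
  let ops := template.2
  (List.range (1 <<< n_inputs.toNat)).foldl
    (fun tt m =>
      let val : List Int := [0, 1]
      let val := (List.range n_inputs.toNat).foldl
        (fun val i =>
          let bit : Int := ((m >>> i) &&& 1 : Nat)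
          (val ++ [bit]) ++ [1 - bit]) val
      let val := ops.foldl
        (fun val ab =>
          let v := Int.land ((PySem.List.pyGet? val ab.1).getD 0) ((PySem.List.pyGet? val ab.2).getD 0)
          (val ++ [v]) ++ [1 - v]) val
      if ((PySem.List.pyGet? val out_lit).getD 0) ≠ 0 then Int.lor tt ((1 : Int) <<< m) else tt) 0

-- ===== PRECONDITION & SPEC =====
-- Pre_ excludes exactly the inputs on which the Python A raises: a negative n_inputs
-- (ValueError on the shift) and any literal reference that is not yet a key of tt_of
-- (KeyError): each op j may only reference literals 0 .. 2+2*n_inputs+2*j-1, and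
-- out_lit must be one of the literals defined at the end.
def Pre_evaluate_template (template : Int × (List (Int × Int))) (n_inputs : Int) : Prop :=
  0 ≤ n_inputs ∧
  (0 ≤ template.1 ∧ template.1 < 2 + 2 * n_inputs + 2 * (template.2.length : Int)) ∧
  ∀ p ∈ PySem.List.enumerate template.2,
    0 ≤ p.2.1 ∧ p.2.1 < 2 + 2 * n_inputs + 2 * p.1 ∧
    0 ≤ p.2.2 ∧ p.2.2 < 2 + 2 * n_inputs + 2 * p.1

instance (template : Int × (List (Int × Int))) (n_inputs : Int) : Decidable (Pre_evaluate_template template n_inputs) := by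
  unfold Pre_evaluate_template; infer_instance

def pvWitness_evaluate_template : (Int × (List (Int × Int))) × Int := ((3, [(2, 3), (5, 0)]), 1)

def Spec_evaluate_template (template : Int × (List (Int × Int))) (n_inputs : Int) (out : Int) : Prop := out = evaluate_template_alt template n_inputs
instance (template : Int × (List (Int × Int))) (n_inputs : Int) (out : Int) : Decidable (Spec_evaluate_template template n_inputs out) := by unfold Spec_evaluate_template; infer_instance

-- ===== CLAIM (what is proved, stated in full; the proofs are below) =====
def Claim_equal_evaluate_template : Prop := ∀ (template : Int × (List (Int × Int))) (n_inputs : Int), Dom_evaluate_template template n_inputs → Pre_evaluate_template template n_inputs → Spec_evaluate_template template n_inputs (evaluate_template template n_inputs)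

-- ===== LEMMAS AND PROOFS =====

-- Int equality from bitwise agreement
theorem pvIntEq (x y : Int) (h : ∀ k, x.testBit k = y.testBit k) : x = y := by
  have key : ∀ (m n : Nat), (∀ k, (Int.ofNat m).testBit k = (Int.negSucc n).testBit k) → False := by
    intro m n hmn
    have h1 := hmn (m + n)
    simp [Int.testBit] at h1
    rw [Nat.testBit_eq_false_of_lt, Nat.testBit_eq_false_of_lt] at h1
    · exact absurd h1 (by simp)
    · calc n < 2 ^ n := Nat.lt_two_pow_self
        _ ≤ 2 ^ (m + n) := Nat.pow_le_pow_right (by norm_num) (by omega)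
    · calc m < 2 ^ m := Nat.lt_two_pow_self
        _ ≤ 2 ^ (m + n) := Nat.pow_le_pow_right (by norm_num) (by omega)
  cases x with
  | ofNat m =>
    cases y with
    | ofNat n => exact congrArg Int.ofNat (Nat.eq_of_testBit_eq (by simpa [Int.testBit] using h))
    | negSucc n => exact absurd h (fun hh => key m n hh)
  | negSucc m =>
    cases y with
    | ofNat n => exact absurd h (fun hh => key n m (fun k => (hh k).symm))
    | negSucc n =>
      have : m = n := Nat.eq_of_testBit_eq (by
        intro k
        have := h k
        simpa [Int.testBit] using this)
      simp [this]

theorem pvNatCast_testBit (n : Nat) (mm : Nat) : ((n : Int)).testBit mm = n.testBit mm := rfl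

theorem pvZero_testBit (mm : Nat) : (0 : Int).testBit mm = false := by simp [Int.testBit]

theorem pvPow_testBit (V mm : Nat) : ((1 : Int) <<< V).testBit mm = decide (V = mm) := by
  rw [Int.shiftLeft_eq, show (1 : Int) * 2 ^ V = ((2 ^ V : Nat) : Int) by push_cast; ring,
    pvNatCast_testBit]
  exact Nat.testBit_two_pow

theorem pvMask_testBit (V mm : Nat) : (((1 : Int) <<< V) - 1).testBit mm = decide (mm < V) := by
  rw [Int.shiftLeft_eq,
    show (1 : Int) * 2 ^ V - 1 = ((2 ^ V - 1 : Nat) : Int) by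
      push_cast [Nat.one_le_two_pow]; ring,
    pvNatCast_testBit]
  exact Nat.testBit_two_pow_sub_one V mm

-- B's per-minterm value list, as proof-level definitions
def pvBit (m i : Nat) : Int := (((m >>> i) &&& 1 : Nat) : Int)

def pvBase (m n : Nat) : List Int :=
  (List.range n).foldl
    (fun val i =>
      let bit : Int := ((m >>> i) &&& 1 : Nat)
      (val ++ [bit]) ++ [1 - bit]) [0, 1]

def pvStep (val : List Int) (ab : Int × Int) : List Int :=
  let v := Int.land ((PySem.List.pyGet? val ab.1).getD 0) ((PySem.List.pyGet? val ab.2).getD 0)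
  (val ++ [v]) ++ [1 - v]

def pvVals (m n : Nat) (ops : List (Int × Int)) : List Int := ops.foldl pvStep (pvBase m n)

theorem pvPrefix_getElem? {l1 l2 : List Int} (h : l1 <+: l2) {k : Nat} (hk : k < l1.length) :
    l2[k]? = l1[k]? := by
  obtain ⟨t, rfl⟩ := h
  exact List.getElem?_append_left hk

theorem pvStep_prefix (val : List Int) (ab : Int × Int) : val <+: pvStep val ab := by
  unfold pvStep
  simp only [List.append_assoc]
  exact List.prefix_append _ _

theorem pvFold_prefix (ops : List (Int × Int)) (val : List Int) : val <+: ops.foldl pvStep val := by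
  induction ops generalizing val with
  | nil => simp
  | cons ab rest ih => exact (pvStep_prefix val ab).trans (ih (pvStep val ab))

theorem pvBase_succ (m n : Nat) :
    pvBase m (n + 1) = pvBase m n ++ [pvBit m n, 1 - pvBit m n] := by
  simp [pvBase, pvBit, List.range_succ]

theorem pvBase_length (m n : Nat) : (pvBase m n).length = 2 + 2 * n := by
  induction n with
  | zero => rfl
  | succ n ih => rw [pvBase_succ]; simp [ih]; omega

theorem pvBase_get0 (m n : Nat) : (pvBase m n)[0]? = some 0 := by
  induction n with
  | zero => rfl
  | succ n ih => rw [pvBase_succ, List.getElem?_append_left (by rw [pvBase_length]; omega)]; exact ih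

theorem pvBase_get1 (m n : Nat) : (pvBase m n)[1]? = some 1 := by
  induction n with
  | zero => rfl
  | succ n ih => rw [pvBase_succ, List.getElem?_append_left (by rw [pvBase_length]; omega)]; exact ih

theorem pvBase_getE (m n i : Nat) (h : i < n) : (pvBase m n)[2 + 2 * i]? = some (pvBit m i) := by
  induction n with
  | zero => omega
  | succ n ih =>
    rw [pvBase_succ]
    rcases Nat.lt_or_ge i n with hi | hi
    · rw [List.getElem?_append_left (by rw [pvBase_length]; omega)]; exact ih hi
    · have hi' : i = n := by omega
      subst hi'
      rw [show 2 + 2 * i = (pvBase m i).length + 0 by simp [pvBase_length]]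
      rw [List.getElem?_append_right (by omega)]
      simp

theorem pvBase_getO (m n i : Nat) (h : i < n) : (pvBase m n)[3 + 2 * i]? = some (1 - pvBit m i) := by
  induction n with
  | zero => omega
  | succ n ih =>
    rw [pvBase_succ]
    rcases Nat.lt_or_ge i n with hi | hi
    · rw [List.getElem?_append_left (by rw [pvBase_length]; omega)]; exact ih hi
    · have hi' : i = n := by omega
      subst hi'
      rw [show 3 + 2 * i = (pvBase m i).length + 1 by rw [pvBase_length]; omega]
      rw [List.getElem?_append_right (by omega)]
      simp

theorem pvVals_append (m n : Nat) (ops tl : List (Int × Int)) :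
    pvVals m n (ops ++ tl) = tl.foldl pvStep (pvVals m n ops) := by
  simp [pvVals, List.foldl_append]

theorem pvVals_prefix (m n : Nat) (ops tl : List (Int × Int)) :
    pvVals m n ops <+: pvVals m n (ops ++ tl) := by
  rw [pvVals_append]; exact pvFold_prefix tl _

theorem pvBase_prefix_vals (m n : Nat) (ops : List (Int × Int)) : pvBase m n <+: pvVals m n ops :=
  pvFold_prefix ops _

theorem pvFold_length (ops : List (Int × Int)) (val : List Int) :
    (ops.foldl pvStep val).length = val.length + 2 * ops.length := by
  induction ops generalizing val with
  | nil => simp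
  | cons ab rest ih => rw [List.foldl_cons, ih]; simp [pvStep]; omega

theorem pvVals_length (m n : Nat) (ops : List (Int × Int)) :
    (pvVals m n ops).length = 2 + 2 * n + 2 * ops.length := by
  rw [pvVals, pvFold_length, pvBase_length]

theorem pvBit_cases (m i : Nat) : pvBit m i = 0 ∨ pvBit m i = 1 := by
  unfold pvBit
  have h : (m >>> i) &&& 1 = (m >>> i) % 2 := Nat.and_one_is_mod _
  have : (m >>> i) % 2 = 0 ∨ (m >>> i) % 2 = 1 := by omega
  rcases this with h2 | h2 <;> simp [h, h2]

theorem pvGetD01 (val : List Int) (hval : ∀ x ∈ val, x = 0 ∨ x = 1) (i : Int) :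
    ((PySem.List.pyGet? val i).getD 0) = 0 ∨ ((PySem.List.pyGet? val i).getD 0) = 1 := by
  cases hg : PySem.List.pyGet? val i with
  | none => simp
  | some x =>
    have := PySem.List.mem_of_pyGet?_eq_some (xs := val) (i := i) hg
    simpa using hval x this

theorem pvBase_zero_one (m n : Nat) : ∀ x ∈ pvBase m n, x = 0 ∨ x = 1 := by
  induction n with
  | zero => intro x hx; simp [pvBase] at hx; rcases hx with h | h <;> simp [h]
  | succ n ih =>
    intro x hx
    rw [pvBase_succ] at hx
    simp only [List.mem_append, List.mem_cons, List.not_mem_nil, or_false] at hx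
    rcases hx with h | h | h
    · exact ih x h
    · rcases pvBit_cases m n with hb | hb <;> simp [h, hb]
    · rcases pvBit_cases m n with hb | hb <;> simp [h, hb]

theorem pvVals_zero_one (m n : Nat) (ops : List (Int × Int)) :
    ∀ x ∈ pvVals m n ops, x = 0 ∨ x = 1 := by
  rw [pvVals]
  generalize hval : pvBase m n = val
  have hv : ∀ x ∈ val, x = 0 ∨ x = 1 := by rw [← hval]; exact pvBase_zero_one m n
  clear hval
  induction ops generalizing val with
  | nil => simpa
  | cons ab rest ih =>
    rw [List.foldl_cons]
    refine ih (pvStep val ab) ?_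
    intro x hx
    have h1 := pvGetD01 val hv ab.1
    have h2 := pvGetD01 val hv ab.2
    simp only [pvStep, List.append_assoc, List.mem_append, List.mem_cons, List.not_mem_nil,
      or_false] at hx
    rcases hx with h | h | h
    · exact hv x h
    · subst h; rcases h1 with h1 | h1 <;> rcases h2 with h2 | h2 <;> simp [h1, h2] <;> decide
    · subst h; rcases h1 with h1 | h1 <;> rcases h2 with h2 | h2 <;> simp [h1, h2] <;> decide

theorem pvVals_step (m n : Nat) (pre : List (Int × Int)) (ab : Int × Int) (suf : List (Int × Int)) :
    (pvVals m n (pre ++ ab :: suf))[2 + 2 * n + 2 * pre.length]?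
        = some (Int.land ((PySem.List.pyGet? (pvVals m n pre) ab.1).getD 0)
            ((PySem.List.pyGet? (pvVals m n pre) ab.2).getD 0)) ∧
    (pvVals m n (pre ++ ab :: suf))[2 + 2 * n + 2 * pre.length + 1]?
        = some (1 - Int.land ((PySem.List.pyGet? (pvVals m n pre) ab.1).getD 0)
            ((PySem.List.pyGet? (pvVals m n pre) ab.2).getD 0)) := by
  have hsplit : pre ++ ab :: suf = (pre ++ [ab]) ++ suf := by simp
  have hpv : pvVals m n (pre ++ [ab]) = pvVals m n pre ++
      [Int.land ((PySem.List.pyGet? (pvVals m n pre) ab.1).getD 0)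
          ((PySem.List.pyGet? (pvVals m n pre) ab.2).getD 0),
        1 - Int.land ((PySem.List.pyGet? (pvVals m n pre) ab.1).getD 0)
          ((PySem.List.pyGet? (pvVals m n pre) ab.2).getD 0)] := by
    rw [pvVals_append]
    simp [pvStep]
  have hpref : pvVals m n (pre ++ [ab]) <+: pvVals m n (pre ++ ab :: suf) := by
    rw [hsplit]; exact pvVals_prefix m n (pre ++ [ab]) suf
  have hlen : (pvVals m n pre).length = 2 + 2 * n + 2 * pre.length := pvVals_length m n pre
  have hlen2 : (pvVals m n (pre ++ [ab])).length = 2 + 2 * n + 2 * pre.length + 2 := by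
    rw [pvVals_length]; simp; omega
  constructor
  · rw [pvPrefix_getElem? hpref (by omega), hpv,
      show 2 + 2 * n + 2 * pre.length = (pvVals m n pre).length + 0 by omega,
      List.getElem?_append_right (by omega)]
    simp
  · rw [pvPrefix_getElem? hpref (by omega), hpv,
      show 2 + 2 * n + 2 * pre.length + 1 = (pvVals m n pre).length + 1 by omega,
      List.getElem?_append_right (by omega)]
    simp

-- dictionary invariant tying A's big integers to B's scalar lists
def pvTgt (n_inputs : Int) (full : List (Int × Int)) (k mm : Nat) : Bool :=
  decide (mm < 1 <<< n_inputs.toNat) && ((pvVals mm n_inputs.toNat full).getD k 0 == 1)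

def pvInv (n_inputs : Int) (full : List (Int × Int)) (d : PySem.Dict Int Int) (L : Nat) : Prop :=
  ∀ k : Nat, k < L → ∃ x : Int, d.get? (k : Int) = some x ∧
    ∀ mm : Nat, x.testBit mm = pvTgt n_inputs full k mm

theorem pvInsertPair (n_inputs : Int) (full : List (Int × Int)) (d : PySem.Dict Int Int) (L : Nat)
    (x0 x1 : Int) (hinv : pvInv n_inputs full d L)
    (h0 : ∀ mm, x0.testBit mm = pvTgt n_inputs full L mm)
    (h1 : ∀ mm, x1.testBit mm = pvTgt n_inputs full (L + 1) mm) :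
    pvInv n_inputs full ((d.insert (L : Int) x0).insert ((L : Int) + 1) x1) (L + 2) := by
  intro k hk
  rcases Nat.lt_or_ge k L with hkL | hkL
  · obtain ⟨x, hx, hbits⟩ := hinv k hkL
    refine ⟨x, ?_, hbits⟩
    rw [PySem.Dict.get?_insert, if_neg (by omega), PySem.Dict.get?_insert, if_neg (by omega)]
    exact hx
  · rcases Nat.lt_or_ge k (L + 1) with hk1 | hk1
    · have hkeq : k = L := by omega
      subst hkeq
      refine ⟨x0, ?_, h0⟩
      rw [PySem.Dict.get?_insert, if_neg (by omega), PySem.Dict.get?_insert, if_pos rfl]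
    · have hkeq : k = L + 1 := by omega
      subst hkeq
      refine ⟨x1, ?_, ?_⟩
      · rw [PySem.Dict.get?_insert, if_pos (by push_cast; ring)]
      · intro mm; exact h1 mm

-- proof-level names for A's loop bodies (definitionally equal to the port's lambdas)
def pvMask (n_inputs : Int) : Int := ((1 : Int) <<< (1 <<< n_inputs.toNat)) - 1

def pvD0 (n_inputs : Int) : PySem.Dict Int Int :=
  (PySem.Dict.empty.insert 0 0).insert 1 (pvMask n_inputs)

def pvStepI (n_inputs : Int) (d : PySem.Dict Int Int) (i : Nat) : PySem.Dict Int Int :=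
  let t := pvInputTT i n_inputs
  (d.insert (2 + 2 * (i : Int)) t).insert (3 + 2 * (i : Int)) (Int.land (~~~t) (pvMask n_inputs))

def pvStepOp (n_inputs : Int) (d : PySem.Dict Int Int) (p : Int × (Int × Int)) :
    PySem.Dict Int Int :=
  let v := Int.land ((d.get? p.2.1).getD 0) ((d.get? p.2.2).getD 0)
  (d.insert ((2 + 2 * n_inputs) + 2 * p.1) (Int.land v (pvMask n_inputs))).insert
    ((2 + 2 * n_inputs) + 2 * p.1 + 1) (Int.land (~~~v) (pvMask n_inputs))

theorem pvOrbitAuxQ (Q : Nat → Bool) (V : Nat) (acc : Int) (mm : Nat) :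
    ((List.range V).foldl (fun tt m => if Q m = true then Int.lor tt ((1 : Int) <<< m) else tt)
        acc).testBit mm
      = (acc.testBit mm || (decide (mm < V) && Q mm)) := by
  induction V generalizing acc with
  | zero => simp
  | succ V ih =>
    rw [List.range_succ, List.foldl_append, List.foldl_cons, List.foldl_nil]
    by_cases hQ : Q V = true
    · rw [if_pos hQ, Int.testBit_lor, ih, pvPow_testBit]
      rcases Nat.lt_trichotomy mm V with h | h | h
      · simp [h, show ¬ (V = mm) from by omega, show mm < V + 1 from by omega]
      · subst h
        simp [hQ, show mm < mm + 1 from by omega]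
      · simp [show ¬ (mm < V) from by omega, show ¬ (V = mm) from by omega,
          show ¬ (mm < V + 1) from by omega]
    · rw [if_neg hQ, ih]
      rcases Nat.lt_trichotomy mm V with h | h | h
      · simp [h, show mm < V + 1 from by omega]
      · subst h
        simp [hQ, show mm < mm + 1 from by omega]
      · simp [show ¬ (mm < V) from by omega, show ¬ (mm < V + 1) from by omega]

theorem pvInputTT_testBit (i : Nat) (n_inputs : Int) (mm : Nat) :
    (pvInputTT i n_inputs).testBit mm
      = (decide (mm < 1 <<< n_inputs.toNat) && ((mm >>> i) &&& 1 == 1)) := by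
  unfold pvInputTT
  rw [pvOrbitAuxQ (fun m => (m >>> i) &&& 1 == 1), pvZero_testBit, Bool.false_or]

theorem pvBitE (m i : Nat) : ((pvBit m i : Int) == 1) = ((m >>> i) &&& 1 == 1) := by
  have h1 : (m >>> i) &&& 1 = (m >>> i) % 2 := Nat.and_one_is_mod _
  have : (m >>> i) &&& 1 = 0 ∨ (m >>> i) &&& 1 = 1 := by omega
  rcases this with h | h <;> simp [pvBit, h]

theorem pvGetD_vals (mm n : Nat) (full : List (Int × Int)) (k : Nat) (x : Int)
    (h : (pvVals mm n full)[k]? = some x) : (pvVals mm n full).getD k 0 = x := by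
  rw [List.getD_eq_getElem?_getD, h, Option.getD_some]

theorem pvD0_inv (n_inputs : Int) (full : List (Int × Int)) :
    pvInv n_inputs full (pvD0 n_inputs) 2 := by
  intro k hk
  interval_cases k
  · refine ⟨0, ?_, ?_⟩
    · rw [pvD0, Nat.cast_zero, PySem.Dict.get?_insert, if_neg (by omega),
        PySem.Dict.get?_insert, if_pos rfl]
    · intro mm
      rw [pvZero_testBit, pvTgt,
        pvGetD_vals mm _ full 0 0 (by
          rw [pvPrefix_getElem? (pvBase_prefix_vals mm _ full) (by rw [pvBase_length]; omega)]
          exact pvBase_get0 mm _)]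
      simp
  · refine ⟨pvMask n_inputs, ?_, ?_⟩
    · rw [pvD0, Nat.cast_one, PySem.Dict.get?_insert, if_pos rfl]
    · intro mm
      rw [pvMask, pvMask_testBit, pvTgt,
        pvGetD_vals mm _ full 1 1 (by
          rw [pvPrefix_getElem? (pvBase_prefix_vals mm _ full) (by rw [pvBase_length]; omega)]
          exact pvBase_get1 mm _)]
      simp

theorem pvStepI_inv (n_inputs : Int) (full : List (Int × Int)) (d : PySem.Dict Int Int) (i : Nat)
    (hi : i < n_inputs.toNat) (hinv : pvInv n_inputs full d (2 + 2 * i)) :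
    pvInv n_inputs full (pvStepI n_inputs d i) (2 + 2 * i + 2) := by
  have hk0 : (2 : Int) + 2 * (i : Int) = ((2 + 2 * i : Nat) : Int) := by push_cast; ring
  have hk1 : (3 : Int) + 2 * (i : Int) = ((2 + 2 * i : Nat) : Int) + 1 := by push_cast; ring
  have hbase : ∀ mm : Nat, (pvVals mm n_inputs.toNat full).getD (2 + 2 * i) 0 = pvBit mm i := by
    intro mm
    exact pvGetD_vals mm _ full _ _ (by
      rw [pvPrefix_getElem? (pvBase_prefix_vals mm _ full) (by rw [pvBase_length]; omega)]
      exact pvBase_getE mm _ i hi)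
  have hbase1 : ∀ mm : Nat,
      (pvVals mm n_inputs.toNat full).getD (2 + 2 * i + 1) 0 = 1 - pvBit mm i := by
    intro mm
    exact pvGetD_vals mm _ full _ _ (by
      rw [pvPrefix_getElem? (pvBase_prefix_vals mm _ full) (by rw [pvBase_length]; omega),
        show 2 + 2 * i + 1 = 3 + 2 * i by omega]
      exact pvBase_getO mm _ i hi)
  rw [pvStepI]
  rw [hk0, hk1]
  refine pvInsertPair n_inputs full d (2 + 2 * i) _ _ hinv ?_ ?_
  · intro mm
    rw [pvInputTT_testBit, pvTgt, hbase mm, pvBitE]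
  · intro mm
    rw [Int.testBit_land, show (~~~pvInputTT i n_inputs) = (pvInputTT i n_inputs).lnot from rfl,
      Int.testBit_lnot, pvInputTT_testBit, pvMask, pvMask_testBit, pvTgt, hbase1 mm]
    rcases pvBit_cases mm i with hb | hb <;>
      rw [show ((1 - pvBit mm i == 1)) = !(pvBit mm i == 1) by rw [hb]; rfl, ← pvBitE] <;>
      cases hd : decide (mm < 1 <<< n_inputs.toNat) <;> simp [hb]

theorem pvInputLoop (n_inputs : Int) (full : List (Int × Int)) (j : Nat)
    (hj : j ≤ n_inputs.toNat) :
    pvInv n_inputs full ((List.range j).foldl (pvStepI n_inputs) (pvD0 n_inputs)) (2 + 2 * j) := by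
  induction j with
  | zero => simpa using pvD0_inv n_inputs full
  | succ j ih =>
    rw [List.range_succ, List.foldl_append, List.foldl_cons, List.foldl_nil]
    have := pvStepI_inv n_inputs full _ j (by omega) (ih (by omega))
    simpa [show 2 + 2 * j + 2 = 2 + 2 * (j + 1) by omega] using this

theorem pvStepOp_inv (n_inputs : Int) (hn : 0 ≤ n_inputs) (pre : List (Int × Int))
    (ab : Int × Int) (suf : List (Int × Int)) (d : PySem.Dict Int Int)
    (ha : 0 ≤ ab.1 ∧ ab.1 < 2 + 2 * n_inputs + 2 * (pre.length : Int))
    (hb : 0 ≤ ab.2 ∧ ab.2 < 2 + 2 * n_inputs + 2 * (pre.length : Int))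
    (hinv : pvInv n_inputs (pre ++ ab :: suf) d (2 + 2 * n_inputs.toNat + 2 * pre.length)) :
    pvInv n_inputs (pre ++ ab :: suf) (pvStepOp n_inputs d ((pre.length : Int), ab))
      (2 + 2 * n_inputs.toNat + 2 * pre.length + 2) := by
  have hcast : n_inputs = (n_inputs.toNat : Int) := (Int.toNat_of_nonneg hn).symm
  have hkey : (2 + 2 * n_inputs) + 2 * ((pre.length : Int), ab).1
      = (((2 + 2 * n_inputs.toNat + 2 * pre.length : Nat) : Int)) := by
    push_cast; omega
  have hL1 : ab.1.toNat < 2 + 2 * n_inputs.toNat + 2 * pre.length := by omega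
  have hL2 : ab.2.toNat < 2 + 2 * n_inputs.toNat + 2 * pre.length := by omega
  obtain ⟨xa, hxa, hbitsa⟩ := hinv ab.1.toNat hL1
  obtain ⟨xb, hxb, hbitsb⟩ := hinv ab.2.toNat hL2
  rw [show ((ab.1.toNat : Nat) : Int) = ab.1 from Int.toNat_of_nonneg ha.1] at hxa
  rw [show ((ab.2.toNat : Nat) : Int) = ab.2 from Int.toNat_of_nonneg hb.1] at hxb
  have hgetfull : ∀ (c : Int), 0 ≤ c → c < 2 + 2 * n_inputs + 2 * (pre.length : Int) → ∀ mm : Nat,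
      (pvVals mm n_inputs.toNat (pre ++ ab :: suf)).getD c.toNat 0
        = (PySem.List.pyGet? (pvVals mm n_inputs.toNat pre) c).getD 0 := by
    intro c hc0 hc1 mm
    have hclt : c.toNat < (pvVals mm n_inputs.toNat pre).length := by
      rw [pvVals_length]; omega
    rw [PySem.List.pyGet?_of_nonneg _ hc0, List.getD_eq_getElem?_getD,
      show (pre ++ ab :: suf) = pre ++ (ab :: suf) from rfl,
      pvPrefix_getElem? (pvVals_prefix mm n_inputs.toNat pre (ab :: suf)) hclt]
  have hstep := fun mm => pvVals_step mm n_inputs.toNat pre ab suf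
  rw [pvStepOp, hxa, hxb, hkey]
  simp only [Option.getD_some]
  refine pvInsertPair n_inputs (pre ++ ab :: suf) d _ _ _ hinv ?_ ?_ <;> intro mm <;>
    obtain ⟨hsE, hsO⟩ := hstep mm
  · rw [Int.testBit_land, Int.testBit_land, pvMask, pvMask_testBit, hbitsa mm, hbitsb mm,
      pvTgt, pvTgt, pvTgt, hgetfull ab.1 ha.1 ha.2 mm, hgetfull ab.2 hb.1 hb.2 mm,
      pvGetD_vals mm _ _ _ _ (by
        rw [show 2 + 2 * n_inputs.toNat + 2 * pre.length
            = 2 + 2 * n_inputs.toNat + 2 * pre.length from rfl]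
        exact hsE)]
    rcases pvGetD01 (pvVals mm n_inputs.toNat pre) (pvVals_zero_one mm _ pre) ab.1 with h1 | h1 <;>
      rcases pvGetD01 (pvVals mm n_inputs.toNat pre) (pvVals_zero_one mm _ pre) ab.2 with h2 | h2 <;>
      rw [h1, h2] <;> cases hd : decide (mm < 1 <<< n_inputs.toNat) <;> simp <;> decide
  · rw [Int.testBit_land,
      show (~~~Int.land xa xb) = (Int.land xa xb).lnot from rfl, Int.testBit_lnot,
      Int.testBit_land, pvMask, pvMask_testBit, hbitsa mm, hbitsb mm,
      pvTgt, pvTgt, pvTgt, hgetfull ab.1 ha.1 ha.2 mm, hgetfull ab.2 hb.1 hb.2 mm,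
      pvGetD_vals mm _ _ _ _ hsO]
    rcases pvGetD01 (pvVals mm n_inputs.toNat pre) (pvVals_zero_one mm _ pre) ab.1 with h1 | h1 <;>
      rcases pvGetD01 (pvVals mm n_inputs.toNat pre) (pvVals_zero_one mm _ pre) ab.2 with h2 | h2 <;>
      rw [h1, h2] <;> cases hd : decide (mm < 1 <<< n_inputs.toNat) <;> simp <;> decide

theorem pvOpsLoop (n_inputs : Int) (hn : 0 ≤ n_inputs) (full : List (Int × Int)) :
    ∀ (suf pre : List (Int × Int)) (d : PySem.Dict Int Int), full = pre ++ suf →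
      (∀ p ∈ PySem.List.enumerate suf (pre.length : Int),
        0 ≤ p.2.1 ∧ p.2.1 < 2 + 2 * n_inputs + 2 * p.1 ∧
        0 ≤ p.2.2 ∧ p.2.2 < 2 + 2 * n_inputs + 2 * p.1) →
      pvInv n_inputs full d (2 + 2 * n_inputs.toNat + 2 * pre.length) →
      pvInv n_inputs full
        ((PySem.List.enumerate suf (pre.length : Int)).foldl (pvStepOp n_inputs) d)
        (2 + 2 * n_inputs.toNat + 2 * pre.length + 2 * suf.length) := by
  intro suf
  induction suf with
  | nil =>
    intro pre d hfull hrefs hinv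
    simpa [PySem.List.enumerate] using hinv
  | cons ab rest ih =>
    intro pre d hfull hrefs hinv
    rw [PySem.List.enumerate_cons, List.foldl_cons]
    have hhead := hrefs ((pre.length : Int), ab) (by
      rw [PySem.List.enumerate_cons]; exact List.mem_cons_self)
    subst hfull
    have hstep := pvStepOp_inv n_inputs hn pre ab rest d ⟨hhead.1, hhead.2.1⟩
      ⟨hhead.2.2.1, hhead.2.2.2⟩ hinv
    have hlen : ((pre.length : Int) + 1) = (((pre ++ [ab]).length : Nat) : Int) := by
      simp
    have hassoc : pre ++ ab :: rest = (pre ++ [ab]) ++ rest := by simp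
    have := ih (pre ++ [ab]) (pvStepOp n_inputs d ((pre.length : Int), ab)) hassoc
      (by
        intro p hp
        apply hrefs
        rw [PySem.List.enumerate_cons]
        exact List.mem_cons_of_mem _ (by rwa [hlen]))
      (by
        have : 2 + 2 * n_inputs.toNat + 2 * (pre ++ [ab]).length
            = 2 + 2 * n_inputs.toNat + 2 * pre.length + 2 := by simp; omega
        rw [this]
        exact hstep)
    rw [← hlen] at this
    have hlen2 : 2 + 2 * n_inputs.toNat + 2 * (pre ++ [ab]).length + 2 * rest.length
        = 2 + 2 * n_inputs.toNat + 2 * pre.length + 2 * (ab :: rest).length := by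
      simp; omega
    rw [hlen2] at this
    exact this

theorem pvOrbitAuxP (P : Nat → Prop) [DecidablePred P] (V : Nat) (acc : Int) (mm : Nat) :
    ((List.range V).foldl (fun tt m => if P m then Int.lor tt ((1 : Int) <<< m) else tt)
        acc).testBit mm
      = (acc.testBit mm || (decide (mm < V) && decide (P mm))) := by
  induction V generalizing acc with
  | zero => simp
  | succ V ih =>
    rw [List.range_succ, List.foldl_append, List.foldl_cons, List.foldl_nil]
    by_cases hQ : P V
    · rw [if_pos hQ, Int.testBit_lor, ih, pvPow_testBit]
      rcases Nat.lt_trichotomy mm V with h | h | h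
      · simp [h, show ¬ (V = mm) from by omega, show mm < V + 1 from by omega]
      · subst h
        simp [hQ, show mm < mm + 1 from by omega]
      · simp [show ¬ (mm < V) from by omega, show ¬ (V = mm) from by omega,
          show ¬ (mm < V + 1) from by omega]
    · rw [if_neg hQ, ih]
      rcases Nat.lt_trichotomy mm V with h | h | h
      · simp [h, show mm < V + 1 from by omega]
      · subst h
        simp [hQ, show mm < mm + 1 from by omega]
      · simp [show ¬ (mm < V) from by omega, show ¬ (mm < V + 1) from by omega]

theorem pvAltBits (n_inputs : Int) (full : List (Int × Int)) (out : Int) (mm : Nat) :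
    ((List.range (1 <<< n_inputs.toNat)).foldl (fun tt m =>
        if ((PySem.List.pyGet? (pvVals m n_inputs.toNat full) out).getD 0) ≠ 0
        then Int.lor tt ((1 : Int) <<< m) else tt) 0).testBit mm
      = (decide (mm < 1 <<< n_inputs.toNat)
          && decide (((PySem.List.pyGet? (pvVals mm n_inputs.toNat full) out).getD 0) ≠ 0)) := by
  rw [pvOrbitAuxP (fun m => ((PySem.List.pyGet? (pvVals m n_inputs.toNat full) out).getD 0) ≠ 0),
    pvZero_testBit, Bool.false_or]

-- ===== VERDICT (by name: the statement is the Claim_ definition above) =====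
theorem evaluate_template_spec : Claim_equal_evaluate_template := by
  intro template n_inputs hdom hpre
  obtain ⟨hn, ⟨ho0, ho1⟩, hops⟩ := hpre
  unfold Spec_evaluate_template
  have hA : evaluate_template template n_inputs
      = (((PySem.List.enumerate template.2 0).foldl (pvStepOp n_inputs)
          ((List.range n_inputs.toNat).foldl (pvStepI n_inputs) (pvD0 n_inputs))).get?
            template.1).getD 0 := rfl
  have hB : evaluate_template_alt template n_inputs
      = (List.range (1 <<< n_inputs.toNat)).foldl (fun tt m =>
          if ((PySem.List.pyGet? (pvVals m n_inputs.toNat template.2) template.1).getD 0) ≠ 0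
          then Int.lor tt ((1 : Int) <<< m) else tt) 0 := rfl
  have hinv1 := pvInputLoop n_inputs template.2 n_inputs.toNat (le_refl _)
  have hinv2 := pvOpsLoop n_inputs hn template.2 template.2 []
    ((List.range n_inputs.toNat).foldl (pvStepI n_inputs) (pvD0 n_inputs))
    (by simp) (by simpa using hops) (by simpa using hinv1)
  simp only [List.length_nil, Nat.cast_zero, mul_zero, add_zero] at hinv2
  have houtlt : template.1.toNat < 2 + 2 * n_inputs.toNat + 2 * template.2.length := by omega
  obtain ⟨x, hx, hbits⟩ := hinv2 template.1.toNat houtlt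
  rw [show ((template.1.toNat : Nat) : Int) = template.1 from Int.toNat_of_nonneg ho0] at hx
  rw [hA, hB, hx, Option.getD_some]
  apply pvIntEq
  intro k
  rw [hbits k, pvAltBits]
  simp only [pvTgt]
  rw [PySem.List.pyGet?_of_nonneg _ ho0, ← List.getD_eq_getElem?_getD]
  have hg : (pvVals k n_inputs.toNat template.2).getD template.1.toNat 0 = 0 ∨
      (pvVals k n_inputs.toNat template.2).getD template.1.toNat 0 = 1 := by
    rw [List.getD_eq_getElem?_getD]
    cases h : (pvVals k n_inputs.toNat template.2)[template.1.toNat]? with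
    | none => simp
    | some y =>
      simpa using pvVals_zero_one k n_inputs.toNat template.2 y (List.mem_of_getElem? h)
  rcases hg with h | h <;> rw [h] <;>
    cases hd : decide (k < 1 <<< n_inputs.toNat) <;> simp
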